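-- pv_equiv track=rewrite | github.com/vivekm92/bsio | src/p901_1000/p982.py | solve
-- ===== SOURCE A (Python) =====
-- def solve(votes):
--
--     n = len(votes)
--     def check(votes, idx):
--         if idx < 0 or idx >= n:
--             return idx
--
--         votes[idx] = check(votes, votes[idx])
--         return votes[idx]
--
--     return sum([check(votes, i) < 0 for i in range(n)])
-- ===== SOURCE B (Python) =====
-- def solve(votes):
--     n = len(votes)
--     count = 0
--     for i in range(n):
--         idx = i
--         while 0 <= idx < n:
--             idx = votes[idx]
--         if idx < 0:
--             count += 1
--     return count
-- ===== Notes on version B (the rewrite author's own statement) =====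
-- stated objective: simpler
-- what changed: A's recursive chain-resolution with in-place path compression (memoizing terminals back into votes) is replaced by a plain iterative chain walk per index with no recursion and no mutation of votes; equality is about the return value only (A mutates votes in place, B does not).
import Mathlib
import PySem

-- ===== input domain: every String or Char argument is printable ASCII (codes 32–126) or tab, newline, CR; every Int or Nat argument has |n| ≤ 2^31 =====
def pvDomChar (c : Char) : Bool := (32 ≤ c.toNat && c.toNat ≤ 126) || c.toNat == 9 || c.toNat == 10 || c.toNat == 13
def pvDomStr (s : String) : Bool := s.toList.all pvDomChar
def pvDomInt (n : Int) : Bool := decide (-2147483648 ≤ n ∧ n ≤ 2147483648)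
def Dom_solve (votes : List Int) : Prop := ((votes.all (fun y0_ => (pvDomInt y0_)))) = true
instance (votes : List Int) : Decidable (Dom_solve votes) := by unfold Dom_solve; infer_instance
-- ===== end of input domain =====

-- B replaces A's recursive resolution with in-place path compression by a plain
-- iterative chain walk per index (simpler, no recursion); A mutates `votes` in
-- place and B does not: the equivalence proved here is about the RETURN value only.

-- ===== PORT A =====
-- A's inner recursion `check` mutates votes; ported as state-passing recursion.
-- `fuel` is a totality guard only (Python recurses unboundedly; under Pre_solve the
-- fuel votes.length + 1 is never exhausted).
def checkA (n : Int) : Nat → List Int → Int → List Int × Int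
  | 0, votes, idx => (votes, idx)
  | fuel + 1, votes, idx =>
    if idx < 0 ∨ n ≤ idx then (votes, idx)
    else
      let r := checkA n fuel votes (votes.getD idx.toNat 0)
      (r.1.set idx.toNat r.2, r.2)

def solve (votes : List Int) : Int :=
  let n : Int := votes.length
  ((List.range votes.length).foldl
    (fun (st : List Int × Int) (i : Nat) =>
      let r := checkA n (votes.length + 1) st.1 (i : Int)
      (r.1, st.2 + (if r.2 < 0 then (1 : Int) else 0)))
    (votes, 0)).2

-- ===== PORT B =====
-- B's `while 0 <= idx < n: idx = votes[idx]`; fuel votes.length suffices under Pre_solve.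
def walkB (votes : List Int) : Nat → Int → Int
  | 0, idx => idx
  | fuel + 1, idx =>
    if 0 ≤ idx ∧ idx < (votes.length : Int) then walkB votes fuel (votes.getD idx.toNat 0)
    else idx

def solve_alt (votes : List Int) : Int :=
  (List.range votes.length).foldl
    (fun (c : Int) (i : Nat) => c + (if walkB votes votes.length (i : Int) < 0 then (1 : Int) else 0)) 0

-- ===== PRECONDITION & SPEC =====
abbrev inRg (votes : List Int) (idx : Int) : Prop := 0 ≤ idx ∧ idx < (votes.length : Int)

-- one step of the vote graph: follow the pointer while it is in range
def stepF (votes : List Int) (idx : Int) : Int :=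
  if inRg votes idx then votes.getD idx.toNat 0 else idx

-- Pre_solve: the vote graph is acyclic — the n-th iterate of the step map leaves the
-- range from every index; exactly the inputs on which Python A's unbounded recursion
-- terminates (on a cycle A raises RecursionError, and B's while loop does not
-- terminate either).
def Pre_solve (votes : List Int) : Prop :=
  ∀ i : Nat, i < votes.length → ¬ inRg votes ((stepF votes)^[votes.length] (i : Int))

instance (votes : List Int) : Decidable (Pre_solve votes) := by
  unfold Pre_solve; infer_instance

def pvWitness_solve : List Int := [1, -1, 5]

def Spec_solve (votes : List Int) (out : Int) : Prop := out = solve_alt votes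
instance (votes : List Int) (out : Int) : Decidable (Spec_solve votes out) := by unfold Spec_solve; infer_instance

-- ===== CLAIM (what is proved, stated in full; the proofs are below) =====
def Claim_equal_solve : Prop := ∀ (votes : List Int), Dom_solve votes → Pre_solve votes → Spec_solve votes (solve votes)

-- ===== LEMMAS AND PROOFS =====

-- proof-side orbit map (k steps of stepF, peeled front-first)
def chaseP (votes : List Int) : Nat → Int → Int
  | 0, idx => idx
  | k + 1, idx => chaseP votes k (stepF votes idx)

lemma chase_iter (votes : List Int) (k : Nat) (idx : Int) :
    chaseP votes k idx = (stepF votes)^[k] idx := by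
  induction k generalizing idx with
  | zero => rfl
  | succ k ih => rw [Function.iterate_succ_apply]; exact ih _

-- the invariant carried through A's mutations
def AllEsc (votes : List Int) : Prop :=
  ∀ i : Nat, i < votes.length → ¬ inRg votes (chaseP votes votes.length (i : Int))

lemma allEsc_of_pre (votes : List Int) (hp : Pre_solve votes) : AllEsc votes := by
  intro i hi
  rw [chase_iter]
  exact hp i hi

lemma chase_out (votes : List Int) (k : Nat) (idx : Int) (h : ¬ inRg votes idx) :
    chaseP votes k idx = idx := by
  induction k with
  | zero => rfl
  | succ k ih => simp [chaseP, stepF, if_neg h, ih]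

lemma chase_add (votes : List Int) (a b : Nat) (idx : Int) :
    chaseP votes (a + b) idx = chaseP votes b (chaseP votes a idx) := by
  induction a generalizing idx with
  | zero => simp [chaseP]
  | succ a ih =>
    have : a + 1 + b = (a + b) + 1 := by omega
    rw [this]
    simp only [chaseP]
    exact ih _

lemma chase_absorb (votes : List Int) (a b : Nat) (idx : Int) (hab : a ≤ b)
    (h : ¬ inRg votes (chaseP votes a idx)) :
    chaseP votes b idx = chaseP votes a idx := by
  have : b = a + (b - a) := by omega
  rw [this, chase_add]
  exact chase_out _ _ _ h

lemma chase_unique (votes : List Int) (a b : Nat) (idx : Int)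
    (ha : ¬ inRg votes (chaseP votes a idx)) (hb : ¬ inRg votes (chaseP votes b idx)) :
    chaseP votes a idx = chaseP votes b idx := by
  rcases le_total a b with h | h
  · rw [chase_absorb votes a b idx h ha]
  · rw [chase_absorb votes b a idx h hb]

lemma walkB_eq_chase (votes : List Int) (k : Nat) (idx : Int) :
    walkB votes k idx = chaseP votes k idx := by
  induction k generalizing idx with
  | zero => rfl
  | succ k ih =>
    by_cases h : inRg votes idx
    · simp [walkB, chaseP, stepF, if_pos h, ih]
    · simp [walkB, chaseP, stepF, if_neg h, chase_out _ _ _ h]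

lemma allEsc_any (votes : List Int) (hp : AllEsc votes) (j : Int) :
    ¬ inRg votes (chaseP votes votes.length (j : Int)) := by
  by_cases hj : inRg votes j
  · have hj0 : (j.toNat : Int) = j := Int.toNat_of_nonneg hj.1
    have hlt : j.toNat < votes.length := by omega
    have := hp j.toNat hlt
    rwa [hj0] at this
  · rw [chase_out _ _ _ hj]; exact hj

lemma inRg_congr (v w : List Int) (h : v.length = w.length) (idx : Int) :
    inRg v idx ↔ inRg w idx := by unfold inRg; rw [h]

lemma allEsc_transfer (v w : List Int) (hlen : w.length = v.length)
    (hT : ∀ j : Int, chaseP w v.length j = chaseP v v.length j)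
    (hp : AllEsc v) : AllEsc w := by
  intro i hi
  rw [hlen] at hi ⊢
  rw [hT, inRg_congr w v hlen]
  exact allEsc_any v hp (i : Int)

lemma getD_set_self (v : List Int) (i : Nat) (t : Int) (hi : i < v.length) :
    (v.set i t).getD i 0 = t := by
  simp [List.getD_eq_getElem?_getD, hi]

lemma getD_set_ne (v : List Int) (i j : Nat) (t : Int) (hij : i ≠ j) :
    (v.set i t).getD j 0 = v.getD j 0 := by
  simp [List.getD_eq_getElem?_getD, List.getElem?_set_ne hij]

-- path-compression shortcut: rewriting slot i with its terminal t preserves every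
-- orbit value at escaped times
lemma shortcut_aux (v : List Int) (i : Nat) (t : Int) (hi : i < v.length)
    (ht : ¬ inRg v t) (hT : chaseP v v.length (i : Int) = t) :
    ∀ k j, ¬ inRg v (chaseP v k j) → chaseP (v.set i t) k j = chaseP v k j := by
  intro k
  induction k with
  | zero => intro j _; rfl
  | succ k ih =>
    intro j hesc
    have hlen : (v.set i t).length = v.length := List.length_set ..
    by_cases hj : inRg v j
    · have hj' : inRg (v.set i t) j := (inRg_congr _ v hlen j).mpr hj
      by_cases hji : j.toNat = i
      · -- j is the rewritten slot: the new orbit jumps straight to t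
        have hj0 : j = (i : Int) := by
          rw [← hji]; exact (Int.toNat_of_nonneg hj.1).symm
        have ht' : ¬ inRg (v.set i t) t := fun h => ht ((inRg_congr _ v hlen t).mp h)
        have hL : chaseP (v.set i t) (k + 1) j = t := by
          show chaseP (v.set i t) k (stepF (v.set i t) j) = t
          rw [stepF, if_pos hj', hji, getD_set_self v i t hi, chase_out _ _ _ ht']
        have hR : chaseP v (k + 1) j = t := by
          rw [chase_unique v (k + 1) v.length j hesc (hj0 ▸ (hT ▸ ht)), hj0, hT]
        rw [hL, hR]
      · -- other slots step as before
        have hne : i ≠ j.toNat := fun h => hji h.symm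
        have hstepL : chaseP (v.set i t) (k + 1) j
            = chaseP (v.set i t) k (v.getD j.toNat 0) := by
          show chaseP (v.set i t) k (stepF (v.set i t) j) = _
          rw [stepF, if_pos hj', getD_set_ne v i j.toNat t hne]
        have hstepR : chaseP v (k + 1) j = chaseP v k (v.getD j.toNat 0) := by
          show chaseP v k (stepF v j) = _
          rw [stepF, if_pos hj]
        rw [hstepL, hstepR]
        exact ih _ (by rw [← hstepR]; exact hesc)
    · have hj' : ¬ inRg (v.set i t) j := fun h => hj ((inRg_congr _ v hlen j).mp h)
      rw [chase_out _ _ _ hj', chase_out _ _ _ hj]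

lemma shortcut (v : List Int) (i : Nat) (t : Int) (hi : i < v.length)
    (ht : ¬ inRg v t) (hT : chaseP v v.length (i : Int) = t) (hp : AllEsc v) :
    ∀ j, chaseP (v.set i t) v.length j = chaseP v v.length j := by
  intro j
  exact shortcut_aux v i t hi ht hT _ j (allEsc_any v hp j)

lemma checkA_spec (v : List Int) (hp : AllEsc v) :
    ∀ (fuel m : Nat) (idx : Int), m < fuel → m ≤ v.length →
    ¬ inRg v (chaseP v m idx) →
    (checkA (v.length : Int) fuel v idx).2 = chaseP v v.length idx ∧
    (checkA (v.length : Int) fuel v idx).1.length = v.length ∧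
    (∀ j, chaseP (checkA (v.length : Int) fuel v idx).1 v.length j = chaseP v v.length j) := by
  intro fuel
  induction fuel with
  | zero => intro m idx h; omega
  | succ fuel ih =>
    intro m idx hmf hmn hesc
    by_cases h : idx < 0 ∨ (v.length : Int) ≤ idx
    · have hout : ¬ inRg v idx := by unfold inRg; omega
      simp only [checkA, if_pos h]
      exact ⟨(chase_out v _ idx hout).symm, trivial, fun j => trivial⟩
    · have hin : inRg v idx := by unfold inRg at *; omega
      have hm0 : m ≠ 0 := by
        intro h0; subst h0; exact hesc hin
      obtain ⟨m', rfl⟩ : ∃ m', m = m' + 1 := ⟨m - 1, by omega⟩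
      have hstep : chaseP v (m' + 1) idx = chaseP v m' (v.getD idx.toNat 0) := by
        show chaseP v m' (stepF v idx) = _
        rw [stepF, if_pos hin]
      have hesc' : ¬ inRg v (chaseP v m' (v.getD idx.toNat 0)) := by
        rw [← hstep]; exact hesc
      obtain ⟨h1, h2, h3⟩ :=
        ih m' (v.getD idx.toNat 0) (by omega) (by omega) hesc'
      have hn1 : 1 ≤ v.length := by
        have := hin.2; omega
      obtain ⟨L, hL⟩ : ∃ L, v.length = L + 1 := ⟨v.length - 1, by omega⟩
      have hfullstep : chaseP v v.length idx = chaseP v L (v.getD idx.toNat 0) := by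
        rw [hL]
        show chaseP v L (stepF v idx) = _
        rw [stepF, if_pos hin]
      have hterm : chaseP v v.length idx = chaseP v v.length (v.getD idx.toNat 0) := by
        rw [hfullstep]
        exact chase_unique v _ _ _
          (by rw [chase_absorb v m' L _ (by omega) hesc']; exact hesc')
          (by rw [chase_absorb v m' v.length _ (by omega) hesc']; exact hesc')
      have htesc : ¬ inRg v (chaseP v v.length idx) := by
        rw [hterm, chase_absorb v m' v.length _ (by omega) hesc']
        exact hesc'
      have hidx : ((idx.toNat : Nat) : Int) = idx := Int.toNat_of_nonneg hin.1
      have hilt : idx.toNat < v.length := by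
        have := hin.2; omega
      simp only [checkA, if_neg h]
      set r := checkA (v.length : Int) fuel v (v.getD idx.toNat 0) with hr
      refine ⟨?_, ?_, ?_⟩
      · rw [h1, hterm]
      · rw [List.length_set, h2]
      · -- terminal preservation through the compression write
        have hp1 : AllEsc r.1 := allEsc_transfer v r.1 h2 h3 hp
        have hi1 : idx.toNat < r.1.length := by rw [h2]; exact hilt
        have ht1 : ¬ inRg r.1 r.2 := by
          rw [h1, ← hterm]
          exact fun hh => htesc ((inRg_congr r.1 v h2 _).mp hh)
        have hT1 : chaseP r.1 r.1.length ((idx.toNat : Nat) : Int) = r.2 := by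
          rw [h2, hidx, h3, h1, hterm]
        have := shortcut r.1 idx.toNat r.2 hi1 ht1 hT1 hp1
        intro j
        have hj := this j
        rw [h2] at hj
        rw [hj, h3]

lemma fold_eq (votes : List Int) :
    ∀ (is : List Nat) (v : List Int) (c : Int),
      v.length = votes.length → AllEsc v →
      (∀ j : Int, chaseP v votes.length j = chaseP votes votes.length j) →
      (is.foldl
        (fun (st : List Int × Int) (i : Nat) =>
          let r := checkA (votes.length : Int) (votes.length + 1) st.1 (i : Int)
          (r.1, st.2 + (if r.2 < 0 then (1 : Int) else 0)))
        (v, c)).2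
      = is.foldl (fun (c : Int) (i : Nat) => c + (if walkB votes votes.length (i : Int) < 0 then (1 : Int) else 0)) c := by
  intro is
  induction is with
  | nil => intro v c _ _ _; rfl
  | cons i is ih =>
    intro v c hlen hp hT
    have hcast : ((votes.length : Nat) : Int) = ((v.length : Nat) : Int) := by rw [hlen]
    obtain ⟨h1, h2, h3⟩ :=
      checkA_spec v hp (votes.length + 1) v.length (i : Int)
        (by omega) le_rfl (allEsc_any v hp (i : Int))
    rw [← hcast] at h1 h2 h3
    rw [List.foldl_cons, List.foldl_cons]
    simp only []
    set r := checkA ((votes.length : Nat) : Int) (votes.length + 1) v (i : Int) with hr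
    have hval : r.2 = walkB votes votes.length (i : Int) := by
      rw [h1, hlen, hT, walkB_eq_chase]
    rw [hval]
    exact ih r.1 _ (by rw [h2, hlen]) (allEsc_transfer v r.1 h2 h3 hp)
      (fun j => by rw [← hlen, h3, hlen, hT])

-- ===== VERDICT (by name: the statement is the Claim_ definition above) =====
theorem solve_spec : Claim_equal_solve := by
  intro votes _ hp
  unfold Spec_solve solve solve_alt
  exact fold_eq votes (List.range votes.length) votes 0 rfl (allEsc_of_pre votes hp)
    (fun _ => rfl)
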